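-- pv_equiv track=rewrite | github.com/GGN-2015/py_buaa_login | py_buaa_login/__main__.py | has_and_remove
-- ===== SOURCE A (Python) =====
-- def has_and_remove(list_val:list[str], s_val:str) -> tuple[bool, list[str]]:
--     return (
--         s_val in list_val,
--         [
--             item
--             for item in list_val
--             if item != s_val
--         ]
--     )
-- ===== SOURCE B (Python) =====
-- def has_and_remove(list_val: list[str], s_val: str) -> tuple[bool, list[str]]:
--     # Repeated index-and-delete: find the first occurrence, splice it out,
--     # repeat until .index raises; found records whether any deletion happened.
--     found = False
--     result = list(list_val)
--     while True:
--         try: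
--             i = result.index(s_val)
--         except ValueError:
--             return (found, result)
--         found = True
--         del result[i]
-- ===== Notes on version B (the rewrite author's own statement) =====
-- stated objective: alternative
-- what changed: Replaces A's membership scan plus filtering comprehension with a destructive loop that repeatedly locates the first occurrence via list.index and deletes it in place until none remain, the found flag recording whether any deletion happened.
import Mathlib
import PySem

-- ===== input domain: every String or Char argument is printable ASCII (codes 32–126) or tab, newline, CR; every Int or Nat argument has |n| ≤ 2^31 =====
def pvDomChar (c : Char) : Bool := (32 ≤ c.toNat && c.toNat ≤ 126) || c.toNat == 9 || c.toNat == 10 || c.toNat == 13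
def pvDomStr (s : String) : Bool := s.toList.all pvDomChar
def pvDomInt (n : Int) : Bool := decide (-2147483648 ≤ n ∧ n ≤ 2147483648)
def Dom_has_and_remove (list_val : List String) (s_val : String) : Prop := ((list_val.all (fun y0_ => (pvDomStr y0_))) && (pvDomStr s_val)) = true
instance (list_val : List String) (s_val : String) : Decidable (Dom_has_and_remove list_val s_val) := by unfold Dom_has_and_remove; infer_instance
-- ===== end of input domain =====

-- ===== PORT A =====
-- A: membership test then a filtering comprehension (two passes)
def has_and_remove (list_val : List String) (s_val : String) : Bool × List String :=
  (list_val.contains s_val, list_val.filter (fun item => item != s_val))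

-- ===== PORT B =====
-- B: repeated first-occurrence lookup and in-place deletion until .index fails
def pvAltLoop (s_val : String) (found : Bool) (result : List String) : Bool × List String :=
  match h : PySem.List.index? result s_val with
  | none => (found, result)
  | some i =>
      pvAltLoop s_val true (result.eraseIdx i)
termination_by result.length
decreasing_by
  obtain ⟨hk, -, -⟩ := PySem.List.getElem_of_index?_eq_some h
  simp [List.length_eraseIdx, hk]
  omega

def has_and_remove_alt (list_val : List String) (s_val : String) : Bool × List String :=
  pvAltLoop s_val false list_val

-- ===== PRECONDITION & SPEC =====
def Spec_has_and_remove (list_val : List String) (s_val : String) (out : Bool × List String) : Prop := out = has_and_remove_alt list_val s_val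
instance (list_val : List String) (s_val : String) (out : Bool × List String) : Decidable (Spec_has_and_remove list_val s_val out) := by unfold Spec_has_and_remove; infer_instance

-- ===== CLAIM (what is proved, stated in full; the proofs are below) =====
def Claim_equal_has_and_remove : Prop := ∀ (list_val : List String) (s_val : String), Dom_has_and_remove list_val s_val → Spec_has_and_remove list_val s_val (has_and_remove list_val s_val)

-- ===== LEMMAS AND PROOFS =====
-- Each deletion loop iteration removes the first occurrence; by induction on length
-- the loop computes (found || contains, filter (≠ s)).
theorem pvAltLoop_eq (s_val : String) : ∀ (n : ℕ) (found : Bool) (l : List String),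
    l.length ≤ n →
    pvAltLoop s_val found l = (found || l.contains s_val, l.filter (fun item => item != s_val)) := by
  intro n
  induction n with
  | zero =>
    intro found l hl
    have : l = [] := List.eq_nil_of_length_eq_zero (Nat.le_zero.mp hl)
    subst this
    simp [pvAltLoop]
  | succ n ih =>
    intro found l hl
    rw [pvAltLoop]
    cases h : PySem.List.index? l s_val with
    | none =>
      have hnm : s_val ∉ l := (PySem.List.index?_eq_none_iff _ _).mp h
      have hc : l.contains s_val = false := by simpa using hnm
      have hf : l.filter (fun item => item != s_val) = l := by
        apply List.filter_eq_self.mpr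
        intro x hx
        have : x ≠ s_val := fun he => hnm (he ▸ hx)
        simp [this]
      simp only [hc, hf, Bool.or_false]
    | some i =>
      obtain ⟨pre, suf, hsplit, hlen, hnp⟩ := (PySem.List.index?_eq_some_iff _ _ _).mp h
      subst hsplit
      have herase : (pre ++ s_val :: suf).eraseIdx i = pre ++ suf := by
        subst hlen; simp [List.eraseIdx_append_of_length_le (le_refl pre.length)]
      show pvAltLoop s_val true ((pre ++ s_val :: suf).eraseIdx i) = _
      rw [herase, ih true (pre ++ suf) (by
        have := hl
        simp only [List.length_append, List.length_cons] at this ⊢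
        omega)]
      have hmem : s_val ∈ pre ++ s_val :: suf := by simp
      have hc : (pre ++ s_val :: suf).contains s_val = true := by simpa using hmem
      have hfilter : (pre ++ suf).filter (fun item => item != s_val)
          = (pre ++ s_val :: suf).filter (fun item => item != s_val) := by
        simp [List.filter_append]
      simp [hfilter]

-- ===== VERDICT (by name: the statement is the Claim_ definition above) =====
theorem has_and_remove_spec : Claim_equal_has_and_remove := by
  intro list_val s_val _
  unfold Spec_has_and_remove has_and_remove has_and_remove_alt
  rw [pvAltLoop_eq s_val list_val.length false list_val (le_refl _)]
  simp
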